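-- pv_equiv track=rewrite | github.com/Awwkaw/adventofcode | 2022/17/17.py | make_stone
-- ===== SOURCE A (Python) =====
-- def make_stone(n: int, y0=2, x0=3) -> [list, list]:
--     if n % 5 == 0:
--         x = [i + x0 for i in range(4)]
--         y = [y0 for i in range(4)]
--     elif n % 5 == 1:
--         x = [1, 0, 1, 2, 1]
--         y = [0, 1, 1, 1, 2]
--         x = [i + x0 for i in x]
--         y = [i + y0 for i in y]
--     elif n % 5 == 2:
--         x = [0, 1, 2, 2, 2]
--         y = [0, 0, 0, 1, 2]
--         x = [i + x0 for i in x]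
--         y = [i + y0 for i in y]
--     elif n % 5 == 3:
--         x = [x0 for i in range(4)]
--         y = [i + y0 for i in range(4)]
--     elif n % 5 == 4:
--         x = [0, 1, 0, 1]
--         y = [0, 0, 1, 1]
--         x = [i + x0 for i in x]
--         y = [i + y0 for i in y]
--
--     return x, y
-- ===== SOURCE B (Python) =====
-- # Each rock is stored as a row bitmap (bottom row first, bit c = column c occupied);
-- # coordinates are generated by scanning the bitmap row by row, column by column.
-- ROCKS = [
--     [0b1111],             # horizontal bar
--     [0b0010, 0b0111, 0b0010],  # plus
--     [0b0111, 0b0100, 0b0100],  # reversed L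
--     [0b0001, 0b0001, 0b0001, 0b0001],  # vertical bar
--     [0b0011, 0b0011],     # square
-- ]
--
--
-- def make_stone(n: int, y0=2, x0=3) -> [list, list]:
--     x, y = [], []
--     for r, row in enumerate(ROCKS[n % 5]):
--         for c in range(4):
--             if (row >> c) & 1:
--                 x.append(x0 + c)
--                 y.append(y0 + r)
--     return x, y
-- ===== Notes on version B (the rewrite author's own statement) =====
-- stated objective: alternative
-- what changed: Replaces the five-branch cascade of explicit coordinate lists by a row-bitmap encoding of each rock (one small int per row) and a single nested scan that decodes bits into coordinates.
import Mathlib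
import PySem

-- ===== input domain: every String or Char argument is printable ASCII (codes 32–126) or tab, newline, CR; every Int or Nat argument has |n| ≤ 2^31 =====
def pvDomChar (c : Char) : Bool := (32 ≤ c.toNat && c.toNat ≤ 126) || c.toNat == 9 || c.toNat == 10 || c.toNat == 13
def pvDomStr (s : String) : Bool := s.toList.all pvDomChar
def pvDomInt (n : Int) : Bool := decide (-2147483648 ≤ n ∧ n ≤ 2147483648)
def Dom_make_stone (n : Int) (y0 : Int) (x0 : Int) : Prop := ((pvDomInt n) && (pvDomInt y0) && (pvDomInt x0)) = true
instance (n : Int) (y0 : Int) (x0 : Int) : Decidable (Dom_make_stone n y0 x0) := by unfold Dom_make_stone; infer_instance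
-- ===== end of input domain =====

-- B encodes each rock as row bitmaps and decodes bits into coordinates in one nested scan (alternative decomposition of the same O(1) task).


-- ===== PORT A =====
def make_stone (n : Int) (y0 : Int) (x0 : Int) : List Int × List Int :=
  if PySem.Int.mod n 5 = 0 then
    ((PySem.List.pyRange 0 4 1).map (fun i => i + x0),
     (PySem.List.pyRange 0 4 1).map (fun _ => y0))
  else if PySem.Int.mod n 5 = 1 then
    (([1, 0, 1, 2, 1] : List Int).map (fun i => i + x0),
     ([0, 1, 1, 1, 2] : List Int).map (fun i => i + y0))
  else if PySem.Int.mod n 5 = 2 then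
    (([0, 1, 2, 2, 2] : List Int).map (fun i => i + x0),
     ([0, 0, 0, 1, 2] : List Int).map (fun i => i + y0))
  else if PySem.Int.mod n 5 = 3 then
    ((PySem.List.pyRange 0 4 1).map (fun _ => x0),
     (PySem.List.pyRange 0 4 1).map (fun i => i + y0))
  else
    (([0, 1, 0, 1] : List Int).map (fun i => i + x0),
     ([0, 0, 1, 1] : List Int).map (fun i => i + y0))

-- ===== PORT B =====
-- Source B's ROCKS table: each rock as row bitmaps, bottom row first, bit c = column c
def pvRocks : List (List Int) := [[15], [2, 7, 2], [7, 4, 4], [1, 1, 1, 1], [3, 3]]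

-- (row >> c) & 1; exact for the nonnegative shift counts produced by range(4)
def pvBit (row : Int) (c : Int) : Int := PySem.Int.band (row >>> c.toNat) 1

def make_stone_alt (n : Int) (y0 : Int) (x0 : Int) : List Int × List Int :=
  let rows := (PySem.List.pyGet? pvRocks (PySem.Int.mod n 5)).getD []
  (PySem.List.enumerate rows).foldl
    (fun (acc : List Int × List Int) rv =>
      (PySem.List.pyRange 0 4 1).foldl
        (fun acc c =>
          if pvBit rv.2 c ≠ 0 then (acc.1 ++ [x0 + c], acc.2 ++ [y0 + rv.1])
          else acc)
        acc)
    ([], [])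

-- ===== PRECONDITION & SPEC =====
def Spec_make_stone (n : Int) (y0 : Int) (x0 : Int) (out : List Int × List Int) : Prop := out = make_stone_alt n y0 x0
instance (n : Int) (y0 : Int) (x0 : Int) (out : List Int × List Int) : Decidable (Spec_make_stone n y0 x0 out) := by unfold Spec_make_stone; infer_instance

-- ===== CLAIM (what is proved, stated in full; the proofs are below) =====
def Claim_equal_make_stone : Prop := ∀ (n : Int) (y0 : Int) (x0 : Int), Dom_make_stone n y0 x0 → Spec_make_stone n y0 x0 (make_stone n y0 x0)

-- ===== LEMMAS AND PROOFS =====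

lemma mod5_eq (n : Int) : PySem.Int.mod n 5 = n % 5 :=
  PySem.Int.mod_eq_emod_of_pos (by norm_num)

lemma mod5_cases (n : Int) : n % 5 = 0 ∨ n % 5 = 1 ∨ n % 5 = 2 ∨ n % 5 = 3 ∨ n % 5 = 4 := by
  omega

-- which bits of each bitmap row in pvRocks are set (used by the simp evaluation below)
lemma pb15_0 : pvBit 15 0 ≠ 0 := by decide
lemma pb15_1 : pvBit 15 1 ≠ 0 := by decide
lemma pb15_2 : pvBit 15 2 ≠ 0 := by decide
lemma pb15_3 : pvBit 15 3 ≠ 0 := by decide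
lemma pb2_0 : pvBit 2 0 = 0 := by decide
lemma pb2_1 : pvBit 2 1 ≠ 0 := by decide
lemma pb2_2 : pvBit 2 2 = 0 := by decide
lemma pb2_3 : pvBit 2 3 = 0 := by decide
lemma pb7_0 : pvBit 7 0 ≠ 0 := by decide
lemma pb7_1 : pvBit 7 1 ≠ 0 := by decide
lemma pb7_2 : pvBit 7 2 ≠ 0 := by decide
lemma pb7_3 : pvBit 7 3 = 0 := by decide
lemma pb4_0 : pvBit 4 0 = 0 := by decide
lemma pb4_1 : pvBit 4 1 = 0 := by decide
lemma pb4_2 : pvBit 4 2 ≠ 0 := by decide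
lemma pb4_3 : pvBit 4 3 = 0 := by decide
lemma pb1_0 : pvBit 1 0 ≠ 0 := by decide
lemma pb1_1 : pvBit 1 1 = 0 := by decide
lemma pb1_2 : pvBit 1 2 = 0 := by decide
lemma pb1_3 : pvBit 1 3 = 0 := by decide
lemma pb3_0 : pvBit 3 0 ≠ 0 := by decide
lemma pb3_1 : pvBit 3 1 ≠ 0 := by decide
lemma pb3_2 : pvBit 3 2 = 0 := by decide
lemma pb3_3 : pvBit 3 3 = 0 := by decide

lemma pyRange04 : PySem.List.pyRange 0 4 1 = [0, 1, 2, 3] := by decide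

-- the row-bitmap list selected for each residue of n % 5
lemma rocks0 : (PySem.List.pyGet? pvRocks 0).getD [] = [15] := by decide
lemma rocks1 : (PySem.List.pyGet? pvRocks 1).getD [] = [2, 7, 2] := by decide
lemma rocks2 : (PySem.List.pyGet? pvRocks 2).getD [] = [7, 4, 4] := by decide
lemma rocks3 : (PySem.List.pyGet? pvRocks 3).getD [] = [1, 1, 1, 1] := by decide
lemma rocks4 : (PySem.List.pyGet? pvRocks 4).getD [] = [3, 3] := by decide

-- ===== VERDICT (by name: the statement is the Claim_ definition above) =====
theorem make_stone_spec : Claim_equal_make_stone := by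
  intro n y0 x0 _
  unfold Spec_make_stone make_stone make_stone_alt
  rcases mod5_cases n with h | h | h | h | h <;>
    · simp only [mod5_eq, h, rocks0, rocks1, rocks2, rocks3, rocks4]
      norm_num [pyRange04, PySem.List.enumerate,
        pb15_0, pb15_1, pb15_2, pb15_3, pb2_0, pb2_1, pb2_2, pb2_3,
        pb7_0, pb7_1, pb7_2, pb7_3, pb4_0, pb4_1, pb4_2, pb4_3,
        pb1_0, pb1_1, pb1_2, pb1_3, pb3_0, pb3_1, pb3_2, pb3_3]
      try omega
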